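/-
  THE EIGHT STRAIGHT POINTER WALKS OF `inverse_mdct` (design/I5.md §4.2) AND THE SETUP LOOPS (§2.2), IN CLOSED FORM.
  The documentation of the whole MDCT vocabulary is the header of Vorbis/Mdct.lean; read that first.

  One namespace per loop (`L1 L2 S2 S456 S7 S8`, and `Setup` for compute_twiddle_factors / compute_window /
  compute_bitreverse), one lemma per POINTER of the loop (a row of I5's table 4.2), plus `test` (the loop test at machine
  level is equivalent to "fewer than COUNT iterations done") and `final` (the pointer values at the exit, which are the next
  loop's initial values).

  CONVENTIONS.  `n` the block size of the frame (`hn : IsBlocksize n`), `t` the number of COMPLETED iterations, so the lemma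
  about a body access has `ht : t < n / 8` (or `n / 16`) and the test lemma `ht : t ≤ n / 8`. `q` is the constant element
  offset of the access inside the iteration (`e[2]` is `q = 2`). An index is in ELEMENTS of the array (floats; `uint16` for the
  bit-reverse table). Sizes: `buffer` ≥ `n` floats (u), `buf2` exactly `n / 2` (v), `A`, `B` `n / 2`, `C` `n / 4`, `bitrev`
  `n / 8` `uint16`.

  A pointer that walks DOWN is `base + (top - step * t)` in natural-number subtraction; its lemma therefore also states that
  the subtraction is not truncated (`step * t + … ≤ top`), which is what a worker needs to step the register
  (`addr_sub_lit`). At the EXIT of a downward loop the pointer is below its array (`buf2 - 8` bytes …): there the closed form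
  in element indices is meaningless, so the `test` lemmas are stated for ANY pointer value `p` tied to `t` by a sum
  (`p + 8 * t + 8 = v + n`), which is valid for all `0 ≤ t ≤ COUNT` including the exit. Recommended loop invariant for a
  downward pointer: exactly that sum about `(u.reg r).toNat`.

  Every lemma here is `have := hn.facts; omega`: a worker whose expression has another shape does the same.
  Numeric cross-check of every statement against the integer replay: design/tools/check_mdct_lemmas.py.
-/
import Vorbis.Mdct.Size
namespace Vorbis.Mdct

/-! ### L1: line 2692 `while (e != e_stop)`, `n / 8` iterations

`e = buffer + 4t` (reads `e[0]`, `e[2]`), `AA = A + 2t` (reads `AA[0]`, `AA[1]`), `d = buf2 + n2 - 2 - 2t` (writes `d[0]`, `d[1]`).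
The only EQUALITY-terminated loop: it stops because `e_stop - e0 = 4 * n2` bytes is a multiple of the stride 16. -/
namespace L1

/-- `e[q]`, `q ≤ 2`: `buffer[0 .. n2 - 2]`. -/
theorem e {n t q : Nat} (hn : IsBlocksize n) (ht : t < n / 8) (hq : q ≤ 2) : 4 * t + q < n / 2 := by
  have := hn.facts
  omega

/-- `AA[q]`, `q ≤ 1`: `A[0 .. n4 - 1]`. -/
theorem AA {n t q : Nat} (hn : IsBlocksize n) (ht : t < n / 8) (hq : q ≤ 1) : 2 * t + q < n / 4 := by
  have := hn.facts
  omega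

/-- `d[q]`, `q ≤ 1`: `buf2[n4 .. n2 - 1]`; the downward index is not truncated. -/
theorem d {n t q : Nat} (hn : IsBlocksize n) (ht : t < n / 8) (hq : q ≤ 1) :
    2 * t + 2 ≤ n / 2 ∧ n / 4 ≤ n / 2 - 2 - 2 * t + q ∧ n / 2 - 2 - 2 * t + q < n / 2 := by
  have := hn.facts
  omega

/-- **The equality test**: after `t` iterations `e` (= `buffer + 16 t` bytes) equals `e_stop` (= `buffer + 2 n` bytes)
exactly when `t = n / 8`. So the loop neither stops early nor (with the invariant `t ≤ n / 8`) runs past `e_stop`; measure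
`n / 8 - t`. -/
theorem test {n t : Nat} (hn : IsBlocksize n) (u : Nat) : u + 16 * t = u + 2 * n ↔ t = n / 8 := by
  have := hn.facts
  omega

/-- The same test on the machine words (`cmp r13, r15 ; jne`): no wrap-around, because `e_stop` is an address. -/
theorem test_addr {n t : Nat} (hn : IsBlocksize n) (ht : t ≤ n / 8) (u : Nat) (hu : u + 2 * n < 2 ^ 64) :
    addr (u + 16 * t) = addr (u + 2 * n) ↔ t = n / 8 := by
  have hf := hn.facts
  constructor
  · intro h
    have e := addr_inj _ _ (by omega) hu h
    omega
  · intro h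
    have e : u + 16 * t = u + 2 * n := by omega
    rw [e]

/-- The stride divides the distance (the reason the equality test terminates). -/
theorem stride {n : Nat} (hn : IsBlocksize n) : 4 * (n / 2) = 16 * (n / 8) := by
  have := hn.facts
  omega

/-- Pointer values at the exit: `d = buf2 + n4 - 2`, `AA = A + n4`, `e = buffer + n2` — L2's initial `d` and `AA`. -/
theorem final {n : Nat} (hn : IsBlocksize n) :
    n / 2 - 2 - 2 * (n / 8) = n / 4 - 2 ∧ 2 * (n / 8) = n / 4 ∧ 4 * (n / 8) = n / 2 ∧ 2 ≤ n / 4 := by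
  have := hn.facts
  omega

end L1

/-! ### L2: line 2701 `while (d >= buf2)`, `n / 8` iterations

`d = buf2 + n4 - 2 - 2t` (writes `d[0]`, `d[1]`), `AA = A + n4 + 2t`, `e = buffer + n2 - 3 - 4t` (reads `e[0]`, `e[2]`).
Unsigned test; exit value `d = buf2 - 8` bytes (never dereferenced), `e = buffer - 3` floats (neither). -/
namespace L2

/-- `d[q]`, `q ≤ 1`: `buf2[0 .. n4 - 1]`. -/
theorem d {n t q : Nat} (hn : IsBlocksize n) (ht : t < n / 8) (hq : q ≤ 1) :
    2 * t + 2 ≤ n / 4 ∧ n / 4 - 2 - 2 * t + q < n / 4 := by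
  have := hn.facts
  omega

/-- `AA[q]`, `q ≤ 1`: `A[n4 .. n2 - 1]`. -/
theorem AA {n t q : Nat} (hn : IsBlocksize n) (ht : t < n / 8) (hq : q ≤ 1) :
    n / 4 ≤ n / 4 + 2 * t + q ∧ n / 4 + 2 * t + q < n / 2 := by
  have := hn.facts
  omega

/-- `e[q]`, `q ≤ 2`: `buffer[1 .. n2 - 1]`. -/
theorem e {n t q : Nat} (hn : IsBlocksize n) (ht : t < n / 8) (hq : q ≤ 2) :
    4 * t + 3 ≤ n / 2 ∧ 1 ≤ n / 2 - 3 - 4 * t + q ∧ n / 2 - 3 - 4 * t + q < n / 2 := by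
  have := hn.facts
  omega

/-- **The unsigned test `d >= buf2`** for the pointer value `p` of `d` after `t ≤ n / 8` iterations
(`p + 8 t + 8 = buf2 + n` bytes: `p = buf2 + 4 (n4 - 2) - 8 t`): true exactly while `t < n / 8`. At `t = n / 8` the value is
`buf2 - 8`, a natural number because `p` is one: no wrap (`buf2 ≥ 800000H`). Measure `n / 8 - t`. -/
theorem test {n t p v : Nat} (hn : IsBlocksize n) (ht : t ≤ n / 8) (hp : p + 8 * t + 8 = v + n) : v ≤ p ↔ t < n / 8 := by
  have := hn.facts
  omega

/-- The pointer value of `d` in the body is the element address of the closed form (links `test`'s `p` to `d`'s index). -/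
theorem ptr {n t p v : Nat} (hn : IsBlocksize n) (ht : t < n / 8) (hp : p + 8 * t + 8 = v + n) :
    p = v + 4 * (n / 4 - 2 - 2 * t) ∧ 8 ≤ p - v + 8 ∧ v ≤ p := by
  have := hn.facts
  omega

/-- The exit value exists as a natural number when `buf2 ≥ 8`: the decrement `d -= 2` of the last iteration does not wrap. -/
theorem exit_value {n v : Nat} (hn : IsBlocksize n) (hv : 8 ≤ v) : (v - 8) + 8 * (n / 8) + 8 = v + n := by
  have := hn.facts
  omega

/-- The OTHER pointer of this loop that ends below its array: `e`, whose value `pe` satisfies `pe + 16 t + 12 = buffer + 2 n`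
for every `t ≤ n / 8` (exit value `buffer - 12` bytes, neither compared nor dereferenced). In the body it is the element
address of the closed form. -/
theorem e_ptr {n t pe u : Nat} (hn : IsBlocksize n) (ht : t < n / 8) (hp : pe + 16 * t + 12 = u + 2 * n) :
    pe = u + 4 * (n / 2 - 3 - 4 * t) ∧ u < pe := by
  have := hn.facts
  omega

/-- The exit value of `e` exists when `buffer ≥ 12` (a setup block). -/
theorem e_exit_value {n u : Nat} (hn : IsBlocksize n) (hu : 12 ≤ u) : (u - 12) + 16 * (n / 8) + 12 = u + 2 * n := by
  have := hn.facts
  omega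

/-- Pointer values at the exit: `AA = A + n2`. -/
theorem final {n : Nat} (hn : IsBlocksize n) : n / 4 + 2 * (n / 8) = n / 2 := by
  have := hn.facts
  omega

end L2

/-! ### S2: step 2, line 2730 `while (AA >= A)`, `n / 16` iterations

`AA = A + n2 - 8 - 8t` (reads `AA[0,1,4,5]`), `e0 = v + n4 + 4t`, `e1 = v + 4t` (read `[0..3]`), `d0 = u + n4 + 4t`, `d1 = u + 4t`
(write `[0..3]`). Exit value `AA = A - 32` bytes. -/
namespace S2

/-- `AA[q]`, `q ≤ 5`: `A[0 .. n2 - 3]`. -/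
theorem AA {n t q : Nat} (hn : IsBlocksize n) (ht : t < n / 16) (hq : q ≤ 5) :
    8 * t + 8 ≤ n / 2 ∧ n / 2 - 8 - 8 * t + q < n / 2 := by
  have := hn.facts
  omega

/-- `e0[q]` and `d0[q]`, `q ≤ 3`: `buf2[n4 .. n2 - 1]`, `buffer[n4 .. n2 - 1]`. -/
theorem hi {n t q : Nat} (hn : IsBlocksize n) (ht : t < n / 16) (hq : q ≤ 3) :
    n / 4 ≤ n / 4 + 4 * t + q ∧ n / 4 + 4 * t + q < n / 2 := by
  have := hn.facts
  omega

/-- `e1[q]` and `d1[q]`, `q ≤ 3`: `buf2[0 .. n4 - 1]`, `buffer[0 .. n4 - 1]`. -/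
theorem lo {n t q : Nat} (hn : IsBlocksize n) (ht : t < n / 16) (hq : q ≤ 3) : 4 * t + q < n / 4 := by
  have := hn.facts
  omega

/-- Row `e0` of I5's table (= `hi`). -/
theorem e0 {n t q : Nat} (hn : IsBlocksize n) (ht : t < n / 16) (hq : q ≤ 3) :
    n / 4 ≤ n / 4 + 4 * t + q ∧ n / 4 + 4 * t + q < n / 2 := hi hn ht hq

/-- Row `d0` of I5's table (= `hi`). -/
theorem d0 {n t q : Nat} (hn : IsBlocksize n) (ht : t < n / 16) (hq : q ≤ 3) :
    n / 4 ≤ n / 4 + 4 * t + q ∧ n / 4 + 4 * t + q < n / 2 := hi hn ht hq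

/-- Row `e1` of I5's table (= `lo`). -/
theorem e1 {n t q : Nat} (hn : IsBlocksize n) (ht : t < n / 16) (hq : q ≤ 3) : 4 * t + q < n / 4 := lo hn ht hq

/-- Row `d1` of I5's table (= `lo`). -/
theorem d1 {n t q : Nat} (hn : IsBlocksize n) (ht : t < n / 16) (hq : q ≤ 3) : 4 * t + q < n / 4 := lo hn ht hq

/-- **The unsigned test `AA >= A`** for the pointer value `p` of `AA` after `t ≤ n / 16` iterations
(`p + 32 t + 32 = A + 2 n` bytes). Exit value `A - 32`. Measure `n / 16 - t`. -/
theorem test {n t p a : Nat} (hn : IsBlocksize n) (ht : t ≤ n / 16) (hp : p + 32 * t + 32 = a + 2 * n) :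
    a ≤ p ↔ t < n / 16 := by
  have := hn.facts
  omega

/-- The pointer value of `AA` in the body is the element address of the closed form. -/
theorem ptr {n t p a : Nat} (hn : IsBlocksize n) (ht : t < n / 16) (hp : p + 32 * t + 32 = a + 2 * n) :
    p = a + 4 * (n / 2 - 8 - 8 * t) ∧ a ≤ p := by
  have := hn.facts
  omega

/-- The exit value exists when `A ≥ 32` (a setup block: `A ≥ 800020H`). -/
theorem exit_value {n a : Nat} (hn : IsBlocksize n) (ha : 32 ≤ a) : (a - 32) + 32 * (n / 16) + 32 = a + 2 * n := by
  have := hn.facts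
  omega

/-- Pointer values at the exit: the four upward pointers have advanced by `n4`. -/
theorem final {n : Nat} (hn : IsBlocksize n) : 4 * (n / 16) = n / 4 ∧ n / 4 + 4 * (n / 16) = n / 2 := by
  have := hn.facts
  omega

end S2

/-! ### S456: steps 4-5-6, line 2819 `while (d0 >= v)`, `n / 16` iterations

`bitrev + 2t` (reads `bitrev[0]`, `bitrev[1]`: `uint16`), `k4 = bitrev[·]` then `u[k4 .. k4 + 3]` (M4), `d0 = v + n4 - 4 - 4t`,
`d1 = v + n2 - 4 - 4t` (write `[0..3]`). Exit value `d0 = v - 16` bytes. -/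
namespace S456

/-- `bitrev[q]`, `q ≤ 1`: `bitrev[0 .. n8 - 1]`. -/
theorem rev {n t q : Nat} (hn : IsBlocksize n) (ht : t < n / 16) (hq : q ≤ 1) : 2 * t + q < n / 8 := by
  have := hn.facts
  omega

/-- `u[k4 + q]`, `q ≤ 3`, with the table entry bounded by M4: `buffer[0 .. n2 - 1]`. -/
theorem u {n k4 q : Nat} (hn : IsBlocksize n) (hk : k4 ≤ n / 2 - 4) (hq : q ≤ 3) : k4 + q < n / 2 := by
  have := hn.facts
  omega

/-- `d0[q]`, `q ≤ 3`: `buf2[0 .. n4 - 1]`. -/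
theorem d0 {n t q : Nat} (hn : IsBlocksize n) (ht : t < n / 16) (hq : q ≤ 3) :
    4 * t + 4 ≤ n / 4 ∧ n / 4 - 4 - 4 * t + q < n / 4 := by
  have := hn.facts
  omega

/-- `d1[q]`, `q ≤ 3`: `buf2[n4 .. n2 - 1]`. -/
theorem d1 {n t q : Nat} (hn : IsBlocksize n) (ht : t < n / 16) (hq : q ≤ 3) :
    4 * t + 4 ≤ n / 2 ∧ n / 4 ≤ n / 2 - 4 - 4 * t + q ∧ n / 2 - 4 - 4 * t + q < n / 2 := by
  have := hn.facts
  omega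

/-- **The unsigned test `d0 >= v`** for the pointer value `p` of `d0` after `t ≤ n / 16` iterations
(`p + 16 t + 16 = v + n` bytes). Exit value `v - 16`. Measure `n / 16 - t`. -/
theorem test {n t p v : Nat} (hn : IsBlocksize n) (ht : t ≤ n / 16) (hp : p + 16 * t + 16 = v + n) :
    v ≤ p ↔ t < n / 16 := by
  have := hn.facts
  omega

/-- The pointer value of `d0` in the body is the element address of the closed form. -/
theorem ptr {n t p v : Nat} (hn : IsBlocksize n) (ht : t < n / 16) (hp : p + 16 * t + 16 = v + n) :
    p = v + 4 * (n / 4 - 4 - 4 * t) ∧ v ≤ p := by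
  have := hn.facts
  omega

/-- The exit value exists when `v ≥ 16`. -/
theorem exit_value {n v : Nat} (hn : IsBlocksize n) (hv : 16 ≤ v) : (v - 16) + 16 * (n / 16) + 16 = v + n := by
  have := hn.facts
  omega

/-- At the exit the table pointer has walked the whole table: `2 * (n / 16) = n / 8`. -/
theorem final {n : Nat} (hn : IsBlocksize n) : 2 * (n / 16) = n / 8 := by
  have := hn.facts
  omega

end S456

/-! ### S7: step 7, line 2854 `while (d < e)`, `n / 16` iterations

`d = v + 4t`, `e = v + n2 - 4 - 4t`, `C + 4t`, each `[0..3]`. Both pointers stay inside `buf2`: exit at `d = v + n4`,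
`e = v + n4 - 4`. -/
namespace S7

/-- `d[q]` and `C[q]`, `q ≤ 3`: `buf2[0 .. n4 - 1]`, `C[0 .. n4 - 1]`. -/
theorem lo {n t q : Nat} (hn : IsBlocksize n) (ht : t < n / 16) (hq : q ≤ 3) : 4 * t + q < n / 4 := by
  have := hn.facts
  omega

/-- `e[q]`, `q ≤ 3`: `buf2[n4 .. n2 - 1]`. -/
theorem e {n t q : Nat} (hn : IsBlocksize n) (ht : t < n / 16) (hq : q ≤ 3) :
    4 * t + 4 ≤ n / 2 ∧ n / 4 ≤ n / 2 - 4 - 4 * t + q ∧ n / 2 - 4 - 4 * t + q < n / 2 := by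
  have := hn.facts
  omega

/-- Row `d` of I5's table (= `lo`). -/
theorem d {n t q : Nat} (hn : IsBlocksize n) (ht : t < n / 16) (hq : q ≤ 3) : 4 * t + q < n / 4 := lo hn ht hq

/-- Row `C` of I5's table (= `lo`). -/
theorem C {n t q : Nat} (hn : IsBlocksize n) (ht : t < n / 16) (hq : q ≤ 3) : 4 * t + q < n / 4 := lo hn ht hq

/-- **The unsigned test `d < e`** with `d = v + 16 t` bytes and `pe` the value of `e` (`pe + 16 t + 16 = v + 2 n`):
`4t < n2 - 4 - 4t ⇔ t < n / 16`. No exit value leaves the array. Measure `n / 16 - t`. -/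
theorem test {n t pe v : Nat} (hn : IsBlocksize n) (ht : t ≤ n / 16) (hp : pe + 16 * t + 16 = v + 2 * n) :
    v + 16 * t < pe ↔ t < n / 16 := by
  have := hn.facts
  omega

/-- The pointer value of `e` (also at the exit, where it is `v + n4 - 4`) is the element address of the closed form. -/
theorem ptr {n t pe v : Nat} (hn : IsBlocksize n) (ht : t ≤ n / 16) (hp : pe + 16 * t + 16 = v + 2 * n) :
    pe = v + 4 * (n / 2 - 4 - 4 * t) ∧ v ≤ pe := by
  have := hn.facts
  omega

end S7

/-! ### S8: step 8, line 2910 `while (e >= v)`, `n / 16` iterations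

`e = buf2 + n2 - 8 - 8t` and `B + n2 - 8 - 8t` (read `[0..7]`), `d0 = buffer + 4t`, `d1 = buffer + n2 - 4 - 4t`,
`d2 = buffer + n2 + 4t`, `d3 = buffer + n - 4 - 4t` (write `[0..3]`). The only place `buffer[n2 .. n - 1]` is touched.
Exit values `e = buf2 - 32`, `B - 32` bytes. -/
namespace S8

/-- `e[q]` and `B[q]`, `q ≤ 7`: `buf2[0 .. n2 - 1]`, `B[0 .. n2 - 1]`. -/
theorem e {n t q : Nat} (hn : IsBlocksize n) (ht : t < n / 16) (hq : q ≤ 7) :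
    8 * t + 8 ≤ n / 2 ∧ n / 2 - 8 - 8 * t + q < n / 2 := by
  have := hn.facts
  omega

/-- Row `B` of I5's table (= `e`: the two pointers walk in step). -/
theorem B {n t q : Nat} (hn : IsBlocksize n) (ht : t < n / 16) (hq : q ≤ 7) :
    8 * t + 8 ≤ n / 2 ∧ n / 2 - 8 - 8 * t + q < n / 2 := e hn ht hq

/-- `d0[q]`, `q ≤ 3`: `buffer[0 .. n4 - 1]`. -/
theorem d0 {n t q : Nat} (hn : IsBlocksize n) (ht : t < n / 16) (hq : q ≤ 3) : 4 * t + q < n / 4 := by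
  have := hn.facts
  omega

/-- `d1[q]`, `q ≤ 3`: `buffer[n4 .. n2 - 1]`. -/
theorem d1 {n t q : Nat} (hn : IsBlocksize n) (ht : t < n / 16) (hq : q ≤ 3) :
    4 * t + 4 ≤ n / 2 ∧ n / 4 ≤ n / 2 - 4 - 4 * t + q ∧ n / 2 - 4 - 4 * t + q < n / 2 := by
  have := hn.facts
  omega

/-- `d2[q]`, `q ≤ 3`: `buffer[n2 .. 3 n4 - 1]`. -/
theorem d2 {n t q : Nat} (hn : IsBlocksize n) (ht : t < n / 16) (hq : q ≤ 3) :
    n / 2 ≤ n / 2 + 4 * t + q ∧ n / 2 + 4 * t + q < 3 * (n / 4) := by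
  have := hn.facts
  omega

/-- `d3[q]`, `q ≤ 3`: `buffer[3 n4 .. n - 1]`. -/
theorem d3 {n t q : Nat} (hn : IsBlocksize n) (ht : t < n / 16) (hq : q ≤ 3) :
    4 * t + 4 ≤ n ∧ 3 * (n / 4) ≤ n - 4 - 4 * t + q ∧ n - 4 - 4 * t + q < n := by
  have := hn.facts
  omega

/-- **The unsigned test `e >= v`** for the pointer value `p` of `e` after `t ≤ n / 16` iterations
(`p + 32 t + 32 = v + 2 n` bytes). Exit value `v - 32`. Measure `n / 16 - t`. -/
theorem test {n t p v : Nat} (hn : IsBlocksize n) (ht : t ≤ n / 16) (hp : p + 32 * t + 32 = v + 2 * n) :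
    v ≤ p ↔ t < n / 16 := by
  have := hn.facts
  omega

/-- The pointer value of `e` (or of `B`, with `v` the table's base) in the body is the element address of the closed form. -/
theorem ptr {n t p v : Nat} (hn : IsBlocksize n) (ht : t < n / 16) (hp : p + 32 * t + 32 = v + 2 * n) :
    p = v + 4 * (n / 2 - 8 - 8 * t) ∧ v ≤ p := by
  have := hn.facts
  omega

/-- The exit value exists when the base is at least 32 (`buf2` a temp block, `B` a setup block: both `≥ 800020H`). -/
theorem exit_value {n v : Nat} (hn : IsBlocksize n) (hv : 32 ≤ v) : (v - 32) + 32 * (n / 16) + 32 = v + 2 * n := by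
  have := hn.facts
  omega

end S8

/-! ### The bytes of each array (what `acc_f32`'s `hlen` is asked)

A float array of `len` elements is a block of `4 * len` bytes; M3 / M6 state the block sizes as `2 n`, `n`, `n / 4`, `4 b1`. -/

/-- The byte sizes of the six arrays of `inverse_mdct` against their element counts. -/
theorem bytes {n : Nat} (hn : IsBlocksize n) :
    4 * (n / 2) = 2 * n ∧ 4 * (n / 4) = n ∧ 2 * (n / 8) = n / 4 ∧ 4 * n = 4 * n ∧ 8 ∣ n / 4 := by
  have := hn.facts
  omega

/-- `inverse_mdct` READS only the first half of `buffer` before step 8 and never touches anything at or above `buffer[n]`;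
the request `4 * n2` bytes of the temp block is `2 n ≤ 16384` (no 32-bit overflow in `lea esi, [rbx * 4]`). -/
theorem temp_request {n : Nat} (hn : IsBlocksize n) : 4 * (n / 2) = 2 * n ∧ 2 * n ≤ 16384 ∧ (2 * n) % 8 = 0 := by
  have := hn.facts
  omega

/-! ### The setup loops (I5 §2.2) -/
namespace Setup

/-- compute_twiddle_factors, loop 1286 (`k < n4`, `k2 = 2k`): `A[k2 + q]`, `B[k2 + q]`, `q ≤ 1`, inside `n2` floats. -/
theorem twiddle_AB {n k q : Nat} (hn : IsBlocksize n) (hk : k < n / 4) (hq : q ≤ 1) : 2 * k + q < n / 2 := by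
  have := hn.facts
  omega

/-- compute_twiddle_factors, loop 1292 (`k < n8`, `k2 = 2k`): `C[k2 + q]`, `q ≤ 1`, inside `n4` floats. -/
theorem twiddle_C {n k q : Nat} (hn : IsBlocksize n) (hk : k < n / 8) (hq : q ≤ 1) : 2 * k + q < n / 4 := by
  have := hn.facts
  omega

/-- compute_twiddle_factors: the integers converted to double (`4 k`, `k2 + 1`, `2 (k2 + 1)`) do not overflow 32 bits. -/
theorem twiddle_ints {n k : Nat} (hn : IsBlocksize n) (hk : k < n / 4) :
    4 * k ≤ 8188 ∧ 2 * k + 1 ≤ 4095 ∧ 2 * (2 * k + 1) ≤ 8190 := by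
  have := hn.facts
  omega

/-- init_blocksize: the five allocation sizes `2n, 2n, n, 2n, n / 4` are positive multiples of 8 below `2 ^ 15`. -/
theorem alloc_sizes {n : Nat} (hn : IsBlocksize n) :
    (2 * n) % 8 = 0 ∧ n % 8 = 0 ∧ (n / 4) % 8 = 0 ∧ 16 ≤ n / 4 ∧ 2 * n ≤ 16384 ∧
    4 * (n / 2) = 2 * n ∧ 4 * (n / 4) = n ∧ 2 * (n / 8) = n / 4 := by
  have := hn.facts
  omega

end Setup

end Vorbis.Mdct
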